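-- pv_equiv track=rewrite | github.com/ShajahanAI/codewars | python/7 kyu/198.py | solve
-- ===== SOURCE A (Python) =====
-- def solve(s:str) -> int:
--     nums = []
--
--     num = str()
--     for idx, char in enumerate(s):
--         if char.isdigit():
--             num += char
--
--         if num and (not char.isdigit() or idx == len(s) - 1):
--             num = int(num)
--             nums.append(num)
--             num = str()
--
--     largest_num = max(nums)
--     return largest_num
-- ===== SOURCE B (Python) =====
-- def solve(s: str) -> int:
--     return max(int(t) for t in ''.join(c if c.isdigit() else ' ' for c in s).split())
-- ===== Notes on version B (the rewrite author's own statement) =====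
-- stated objective: idiomatic
-- what changed: Replaces the manual indexed scanner with its flush-at-last-index bookkeeping by a declarative pipeline: map non-digit characters to spaces, tokenize with str.split(), and take max of the int-converted tokens.
import Mathlib
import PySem

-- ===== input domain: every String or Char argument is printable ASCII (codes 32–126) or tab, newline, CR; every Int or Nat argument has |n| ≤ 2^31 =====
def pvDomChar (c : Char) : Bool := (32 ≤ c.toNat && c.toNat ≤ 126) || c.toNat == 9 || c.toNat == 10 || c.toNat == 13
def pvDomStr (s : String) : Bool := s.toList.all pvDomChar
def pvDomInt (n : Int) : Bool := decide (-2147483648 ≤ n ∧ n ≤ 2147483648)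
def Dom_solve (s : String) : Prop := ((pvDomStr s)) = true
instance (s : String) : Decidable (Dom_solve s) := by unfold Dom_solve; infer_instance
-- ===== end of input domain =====

-- B replaces A's manual indexed scanner by a declarative pipeline (blank out non-digits,
-- str.split(), max of ints) — objective: idiomatic; return value only, no mutation involved.

-- ===== PORT A =====
-- int(num): never fails on A's flushed runs (nonempty digit strings); getD 0 is unreachable filler
def pvToInt (t : List Char) : Int := (PySem.Int.ofChars? t).getD 0

-- one iteration of A's `for idx, char in enumerate(s)` body; state = (nums, num)
def pvStepA (nlen : Int) (st : List Int × List Char) (p : Int × Char) : List Int × List Char :=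
  let num := if PySem.Chars.isdigit p.2 then st.2 ++ [p.2] else st.2
  if num ≠ [] ∧ (¬ PySem.Chars.isdigit p.2 = true ∨ p.1 = nlen - 1) then
    (st.1 ++ [pvToInt num], [])
  else
    (st.1, num)

def solve (s : String) : Int :=
  let cs := s.toList
  let st := (PySem.List.enumerate cs 0).foldl (pvStepA (PySem.Str.len s)) ([], [])
  -- max(nums): raises ValueError on an empty list (no digits in s); excluded by Pre_solve
  (PySem.List.max? st.1 (fun x => x)).getD 0

-- ===== PORT B =====
def solve_alt (s : String) : Int :=
  let cleaned := s.toList.map (fun c => if PySem.Chars.isdigit c then c else ' ')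
  let nums := (PySem.Chars.split₀ cleaned).map (fun t => pvToInt t)
  -- max(...): raises ValueError when s has no digit; excluded by Pre_solve
  (PySem.List.max? nums (fun x => x)).getD 0

-- ===== PRECONDITION & SPEC =====
-- Pre_ excludes exactly the strings without any digit, on which A's max([]) raises ValueError
-- (B's max() raises there too).
def Pre_solve (s : String) : Prop := s.toList.any PySem.Chars.isdigit = true
instance (s : String) : Decidable (Pre_solve s) := by unfold Pre_solve; infer_instance
def pvWitness_solve : String := "x91 7"
def Spec_solve (s : String) (out : Int) : Prop := out = solve_alt s
instance (s : String) (out : Int) : Decidable (Spec_solve s out) := by unfold Spec_solve; infer_instance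

-- ===== CLAIM (what is proved, stated in full; the proofs are below) =====
def Claim_equal_solve : Prop := ∀ (s : String), Dom_solve s → Pre_solve s → Spec_solve s (solve s)

-- ===== LEMMAS AND PROOFS =====
theorem pv_isspace_of_isdigit (c : Char) (h : PySem.Chars.isdigit c = true) :
    PySem.Chars.isspace c = false := by
  simp only [PySem.Chars.isdigit, Bool.and_eq_true, decide_eq_true_eq, Char.le_def,
    UInt32.le_iff_toNat_le, show ('0' : Char).val.toNat = 48 from rfl,
    show ('9' : Char).val.toNat = 57 from rfl] at h
  simp only [PySem.Chars.isspace, Bool.or_eq_false_iff, Bool.and_eq_false_iff,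
    decide_eq_false_iff_not, Char.toNat]
  omega

theorem pvMain (n : Nat) :
    ∀ (suffix : List Char) (k : Nat) (num : List Char) (accB : List (List Char))
      (nums : List Int),
      nums = accB.reverse.map pvToInt →
      k + suffix.length = n →
      suffix ≠ [] →
      ((PySem.List.enumerate suffix (k : Int)).foldl (pvStepA (n : Int)) (nums, num)).1
        = (PySem.Chars.split₀.go
            (suffix.map (fun c => if PySem.Chars.isdigit c then c else ' '))
            num.reverse accB).map pvToInt := by
  intro suffix
  induction suffix with
  | nil => intro k num accB nums _ _ h3; exact absurd rfl h3
  | cons c t ih =>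
    intro k num accB nums hn hk _
    rw [PySem.List.enumerate_cons, List.map_cons, List.foldl_cons]
    by_cases hd : PySem.Chars.isdigit c = true
    · -- digit character: appended to the current run
      rw [if_pos hd, PySem.Chars.split₀.go, if_neg (by simp [pv_isspace_of_isdigit c hd])]
      by_cases ht : t = []
      · -- last character of the string: A flushes inside the loop (idx == len(s)-1)
        subst ht
        have hkn : (k : Int) = (n : Int) - 1 := by
          simp at hk; omega
        simp only [pvStepA, hd, if_true, List.map_nil, PySem.List.enumerate_nil,
          List.foldl_nil]
        rw [if_pos ⟨by simp, Or.inr hkn⟩]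
        rw [PySem.Chars.split₀.go]
        simp [hn]
      · have hkn : ¬ ((k : Int) = (n : Int) - 1) := by
          have : t.length ≠ 0 := by simpa using ht
          simp at hk; omega
        have hstep : pvStepA (n : Int) (nums, num) ((k : Int), c)
            = (nums, num ++ [c]) := by
          simp only [pvStepA, hd, if_true]
          rw [if_neg (by rintro ⟨-, h | h⟩; exacts [h trivial, hkn h])]
        rw [hstep]
        have := ih (k + 1) (num ++ [c]) accB nums hn (by simp at hk ⊢; omega) ht
        simpa using this
    · -- non-digit character: both sides flush the pending run (if any)
      rw [if_neg hd, PySem.Chars.split₀.go,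
        if_pos (by decide : PySem.Chars.isspace ' ' = true)]
      have hstep : pvStepA (n : Int) (nums, num) ((k : Int), c)
          = (if num = [] then (nums, []) else (nums ++ [pvToInt num], [])) := by
        simp only [pvStepA, hd, Bool.not_eq_true]
        by_cases hnum : num = []
        · rw [if_neg (by rintro ⟨h, -⟩; exact h hnum), if_pos hnum, hnum]
          simp
        · rw [if_pos ⟨hnum, Or.inl (by simp)⟩, if_neg hnum]
          simp
      rw [hstep]
      by_cases hnum : num = []
      · rw [if_pos hnum, if_pos (by simp [hnum])]
        subst hnum
        by_cases ht : t = []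
        · subst ht
          simp only [List.map_nil, PySem.List.enumerate_nil, List.foldl_nil]
          rw [PySem.Chars.split₀.go]
          simp [hn]
        · have := ih (k + 1) [] accB nums hn (by simp at hk ⊢; omega) ht
          simpa using this
      · rw [if_neg hnum, if_neg (by simp [hnum])]
        by_cases ht : t = []
        · subst ht
          simp only [List.map_nil, PySem.List.enumerate_nil, List.foldl_nil]
          rw [PySem.Chars.split₀.go]
          simp [hn]
        · have := ih (k + 1) [] (num :: accB) (nums ++ [pvToInt num])
            (by simp [hn]) (by simp at hk ⊢; omega) ht
          simpa using this

-- ===== VERDICT (by name: the statement is the Claim_ definition above) =====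
theorem solve_spec : Claim_equal_solve := by
  intro s _ hpre
  unfold Spec_solve solve solve_alt
  have hne : s.toList ≠ [] := by
    intro h
    rw [Pre_solve, h] at hpre
    simp at hpre
  have hmain := pvMain s.toList.length s.toList 0 [] [] [] rfl (by simp) hne
  simp only [Nat.cast_zero, List.reverse_nil] at hmain
  show (PySem.List.max?
      ((PySem.List.enumerate s.toList 0).foldl (pvStepA (s.toList.length : Int)) ([], [])).1
      (fun x => x)).getD 0
    = (PySem.List.max?
      (List.map pvToInt
        (PySem.Chars.split₀.go
          (List.map (fun c => if PySem.Chars.isdigit c = true then c else ' ') s.toList) [] []))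
      (fun x => x)).getD 0
  rw [hmain]
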